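-- pv_equiv track=rewrite | github.com/AdeleHardie/adventofcode | 2024/day_02.py | check
-- ===== SOURCE A (Python) =====
-- def check(levels):
--     # check if decreasing
--     diff = levels[1]-levels[0]
--     if diff < 0:
--         direction = -1
--     else:
--         direction = 1
--
--     for i in range(len(levels)-1):
--         diff = (levels[i+1]-levels[i])*direction # make positive if decreasing
--         # check for magnitude
--         if diff > 3 or diff == 0:
--             return True
--         # check for direction
--         if diff < 0:
--             return True
--
--     return False
-- ===== SOURCE B (Python) =====
-- def check(levels):
--     diffs = [b - a for a, b in zip(levels, levels[1:])]
--     inc = all(1 <= d <= 3 for d in diffs)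
--     dec = all(-3 <= d <= -1 for d in diffs)
--     return not (inc or dec)
-- ===== Notes on version B (the rewrite author's own statement) =====
-- stated objective: alternative
-- what changed: Replaces A's direction-variable single pass with early returns by materializing the consecutive-difference list and testing two whole-list predicates (all increases in 1..3, or all decreases in -3..-1).
-- outside the precondition, e.g. on check([1]): A raises IndexError, B returns False; on check([0]): A raises IndexError, B returns False
import Mathlib
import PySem

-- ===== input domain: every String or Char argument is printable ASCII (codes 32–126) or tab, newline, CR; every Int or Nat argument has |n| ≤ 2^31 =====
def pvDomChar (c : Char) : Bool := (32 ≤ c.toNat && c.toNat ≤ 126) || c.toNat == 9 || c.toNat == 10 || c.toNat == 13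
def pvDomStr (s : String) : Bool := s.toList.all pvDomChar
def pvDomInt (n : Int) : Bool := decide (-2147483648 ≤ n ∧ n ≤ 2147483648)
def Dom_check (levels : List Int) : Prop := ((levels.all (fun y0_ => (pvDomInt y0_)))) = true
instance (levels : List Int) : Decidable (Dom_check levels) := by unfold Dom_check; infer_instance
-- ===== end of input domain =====

-- B replaces A's direction-variable single pass (early returns) by materializing the
-- difference list and testing two whole-list range predicates; same cost, different shape.

-- ===== PORT A =====
-- the for-loop of A: early return True on a bad step, False after the last index
def checkLoop (levels : List Int) (direction : Int) : List Int → Bool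
  | [] => false
  | i :: rest =>
    match PySem.List.pyGet? levels (i + 1), PySem.List.pyGet? levels i with
    | some a, some b =>
      let diff := (a - b) * direction
      if diff > 3 ∨ diff = 0 then true
      else if diff < 0 then true
      else checkLoop levels direction rest
    | _, _ => false   -- IndexError (unreachable: range indices are in bounds)

def check (levels : List Int) : Bool :=
  match PySem.List.pyGet? levels 1, PySem.List.pyGet? levels 0 with
  | some l1, some l0 =>
    let diff := l1 - l0
    let direction : Int := if diff < 0 then -1 else 1
    checkLoop levels direction (PySem.List.pyRange 0 ((levels.length : Int) - 1) 1)
  | _, _ => false     -- IndexError: excluded by Pre_check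

-- ===== PORT B =====
def check_alt (levels : List Int) : Bool :=
  let diffs := (levels.zip (PySem.List.slice levels (some 1) none)).map (fun p => p.2 - p.1)
  let inc := diffs.all (fun d => decide (1 ≤ d ∧ d ≤ 3))
  let dec := diffs.all (fun d => decide (-3 ≤ d ∧ d ≤ -1))
  !(inc || dec)

-- ===== PRECONDITION & SPEC =====
-- A reads levels[1] and levels[0] before anything else: it raises IndexError on lists
-- of length < 2, so exactly those inputs are excluded.
def Pre_check (levels : List Int) : Prop := 2 ≤ levels.length
instance (levels : List Int) : Decidable (Pre_check levels) := by unfold Pre_check; infer_instance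
def pvWitness_check : List Int := [1, 3, 4]

def Spec_check (levels : List Int) (out : Bool) : Prop := out = check_alt levels
instance (levels : List Int) (out : Bool) : Decidable (Spec_check levels out) := by unfold Spec_check; infer_instance

-- ===== CLAIM (what is proved, stated in full; the proofs are below) =====
def Claim_equal_check : Prop := ∀ (levels : List Int), Dom_check levels → Pre_check levels → Spec_check levels (check levels)

-- ===== LEMMAS AND PROOFS =====

-- the difference list B materializes, written over tail for the proofs
def diffsOf (levels : List Int) : List Int :=
  (levels.zip levels.tail).map (fun p => p.2 - p.1)

theorem diffsOf_eq_map_range (levels : List Int) :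
    diffsOf levels = (List.range (levels.length - 1)).map
      (fun i => levels[i + 1]! - levels[i]!) := by
  apply List.ext_getElem
  · simp only [diffsOf, List.length_map, List.length_zip, List.length_tail, List.length_range]
    omega
  · intro i h1 h2
    simp [diffsOf] at h1 ⊢
    have hi1 : i + 1 < levels.length := by omega
    have hi : i < levels.length := by omega
    simp [hi, hi1]

theorem checkLoop_range' (levels : List Int) (dir : Int) :
    ∀ (m k : Nat), k + m < levels.length →
    checkLoop levels dir (List.map (fun i : Nat => (i : Int)) (List.range' k m))
      = !((List.range' k m).all fun i =>
          decide (1 ≤ (levels[i + 1]! - levels[i]!) * dir ∧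
                  (levels[i + 1]! - levels[i]!) * dir ≤ 3)) := by
  intro m
  induction m with
  | zero => intro k _; simp [checkLoop]
  | succ m ih =>
    intro k hk
    have hk1 : k + 1 < levels.length := by omega
    have hk0 : k < levels.length := by omega
    have g1 : PySem.List.pyGet? levels ((k : Int) + 1) = some levels[k + 1]! := by
      have h : ((k : Int)) + 1 = ((k + 1 : Nat) : Int) := by omega
      rw [h, PySem.List.pyGet?_natCast]
      simp [hk1, getElem!_pos]
    have g0 : PySem.List.pyGet? levels ((k : Int)) = some levels[k]! := by
      rw [PySem.List.pyGet?_natCast]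
      simp [hk0, getElem!_pos]
    rw [List.range'_succ]
    simp only [List.map_cons, checkLoop, g1, g0, List.all_cons]
    rw [ih (k + 1) (by omega)]
    generalize (levels[k + 1]! - levels[k]!) * dir = d
    generalize ((List.range' (k + 1) m).all fun i =>
      decide (1 ≤ (levels[i + 1]! - levels[i]!) * dir ∧
              (levels[i + 1]! - levels[i]!) * dir ≤ 3)) = rest
    by_cases hgood : 1 ≤ d ∧ d ≤ 3
    · rw [if_neg (by omega), if_neg (by omega)]
      rw [decide_eq_true (by omega : (1:Int) ≤ d ∧ d ≤ 3)]
      simp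
    · have hfalse : decide (1 ≤ d ∧ d ≤ 3) = false := by
        simp only [decide_eq_false_iff_not]; exact hgood
      rw [hfalse]
      by_cases h3 : d > 3 ∨ d = 0
      · rw [if_pos h3]; simp
      · rw [if_neg h3, if_pos (by omega)]; simp

theorem check_char (levels : List Int) (h2 : 2 ≤ levels.length) (dir : Int)
    (hdir : dir = if levels[1]! - levels[0]! < 0 then -1 else 1) :
    check levels = !((diffsOf levels).all fun d => decide (1 ≤ d * dir ∧ d * dir ≤ 3)) := by
  have h1 : 1 < levels.length := by omega
  have h0 : 0 < levels.length := by omega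
  have g1 : PySem.List.pyGet? levels 1 = some levels[1]! := by
    rw [show (1 : Int) = ((1 : Nat) : Int) from rfl, PySem.List.pyGet?_natCast]
    simp [h1, getElem!_pos]
  have g0 : PySem.List.pyGet? levels 0 = some levels[0]! := by
    rw [show (0 : Int) = ((0 : Nat) : Int) from rfl, PySem.List.pyGet?_natCast]
    simp [h0, getElem!_pos]
  have hcast : (levels.length : Int) - 1 = ((levels.length - 1 : Nat) : Int) := by
    omega
  unfold check
  rw [g1, g0]
  dsimp only
  rw [hcast, PySem.List.pyRange_zero_natCast, List.range_eq_range',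
    checkLoop_range' levels _ _ 0 (by omega), diffsOf_eq_map_range, List.all_map,
    List.range_eq_range']
  rw [← hdir]
  rfl

theorem diffsOf_head (l0 l1 : Int) (rest : List Int) :
    diffsOf (l0 :: l1 :: rest) = (l1 - l0) :: diffsOf (l1 :: rest) := by
  simp [diffsOf]

-- ===== VERDICT (by name: the statement is the Claim_ definition above) =====
theorem check_spec : Claim_equal_check := by
  intro levels _ hpre
  unfold Spec_check check_alt
  rw [PySem.List.slice_from_one]
  show check levels = !((diffsOf levels).all _ || (diffsOf levels).all _)
  have h2 : 2 ≤ levels.length := hpre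
  obtain ⟨l0, levels', rfl⟩ : ∃ a t, levels = a :: t := by
    cases levels with
    | nil => simp at h2
    | cons a t => exact ⟨a, t, rfl⟩
  obtain ⟨l1, rest, rfl⟩ : ∃ a t, levels' = a :: t := by
    cases levels' with
    | nil => simp at h2
    | cons a t => exact ⟨a, t, rfl⟩
  have hhead : (l0 :: l1 :: rest)[1]! - (l0 :: l1 :: rest)[0]! = l1 - l0 := by
    simp [getElem!_pos]
  by_cases hneg : l1 - l0 < 0
  · rw [check_char _ h2 (-1) (by rw [hhead]; simp [hneg])]
    have hinc : ((diffsOf (l0 :: l1 :: rest)).all fun d => decide (1 ≤ d ∧ d ≤ 3)) = false := by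
      rw [diffsOf_head]
      simp only [List.all_cons, Bool.and_eq_false_iff]
      left
      simp only [decide_eq_false_iff_not]
      omega
    rw [hinc]
    simp only [Bool.false_or]
    have hfun : (fun d : Int => decide (1 ≤ d * -1 ∧ d * -1 ≤ 3))
        = (fun d : Int => decide (-3 ≤ d ∧ d ≤ -1)) := by
      funext d
      rw [decide_eq_decide]
      omega
    rw [hfun]
  · rw [check_char _ h2 1 (by rw [hhead]; simp [hneg])]
    have hdec : ((diffsOf (l0 :: l1 :: rest)).all fun d => decide (-3 ≤ d ∧ d ≤ -1)) = false := by
      rw [diffsOf_head]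
      simp only [List.all_cons, Bool.and_eq_false_iff]
      left
      simp only [decide_eq_false_iff_not]
      omega
    rw [hdec]
    simp only [Bool.or_false]
    have hfun : (fun d : Int => decide (1 ≤ d * 1 ∧ d * 1 ≤ 3))
        = (fun d : Int => decide (1 ≤ d ∧ d ≤ 3)) := by
      funext d
      rw [decide_eq_decide]
      omega
    rw [hfun]
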